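-- pv_equiv track=rewrite | github.com/AlexPerazzo/AdventofCode2022 | Advent Of Code 2022/Dec 11th, 2022.py | monkey2_throw
-- ===== SOURCE A (Python) =====
-- def monkey2_throw(monkey0_count, monkey0_list, monkey6_list, monkey2_list):
--     for item in monkey0_list:
--         value = 13 * item
--         if value > 10000:
--             value = str(value)
--             list = []
--             for letter in value:
--                 list.append(letter)
--             while (list[-1] == "0") and (list[-2] == "0") and (list[-3] == "0"):
--                 list.pop()
--             new_value = f"{list[-4]}{list[-3]}{list[-2]}{list[-1]}"
--             value = int(new_value)
--
--         if value % 7 == 0: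
--             monkey6_list.append(value)
--         else:
--             monkey2_list.append(value)
--         monkey0_count += 1
--     monkey0_list.clear()
--
--     return monkey0_count, monkey0_list, monkey6_list, monkey2_list
-- ===== SOURCE B (Python) =====
-- # B: replaces A's string/char-list digit stripping with modular arithmetic,
-- # and builds the two output lists by a map + two filters instead of a branchy loop.
-- def _transform(item):
--     value = 13 * item
--     if value > 10000:
--         while value % 1000 == 0:
--             value //= 10
--         value %= 10000
--     return value
--
--
-- def monkey2_throw(monkey0_count, monkey0_list, monkey6_list, monkey2_list):
--     vals = [_transform(item) for item in monkey0_list]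
--     monkey6_list += [v for v in vals if v % 7 == 0]
--     monkey2_list += [v for v in vals if v % 7 != 0]
--     monkey0_count += len(vals)
--     monkey0_list.clear()
--     return monkey0_count, monkey0_list, monkey6_list, monkey2_list
-- ===== Notes on version B (the rewrite author's own statement) =====
-- stated objective: simpler
-- what changed: The trailing-zero stripping of large worry values is done with modular arithmetic (while value % 1000 == 0: value //= 10; then value %= 10000) instead of converting to a string, copying it char by char, popping chars and reparsing an f-string, and the two output lists are built by a map plus two filters instead of a branchy counting loop.
import Mathlib
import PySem

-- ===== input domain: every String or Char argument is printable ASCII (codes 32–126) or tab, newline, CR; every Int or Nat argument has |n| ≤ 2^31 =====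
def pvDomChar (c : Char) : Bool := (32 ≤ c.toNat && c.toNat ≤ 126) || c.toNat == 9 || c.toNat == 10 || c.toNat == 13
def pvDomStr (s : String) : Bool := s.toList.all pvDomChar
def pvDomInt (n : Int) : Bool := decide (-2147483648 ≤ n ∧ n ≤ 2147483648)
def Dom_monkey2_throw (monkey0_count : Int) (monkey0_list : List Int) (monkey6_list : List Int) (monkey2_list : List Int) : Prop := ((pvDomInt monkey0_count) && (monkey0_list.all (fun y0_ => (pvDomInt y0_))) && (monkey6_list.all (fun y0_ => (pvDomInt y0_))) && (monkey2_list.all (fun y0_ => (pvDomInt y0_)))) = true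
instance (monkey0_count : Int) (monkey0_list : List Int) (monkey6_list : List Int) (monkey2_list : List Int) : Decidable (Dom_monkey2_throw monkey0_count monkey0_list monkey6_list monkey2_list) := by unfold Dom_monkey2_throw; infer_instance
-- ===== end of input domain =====

-- B replaces A's string/char-list digit stripping with modular arithmetic and builds the two
-- output lists by map + filter instead of a branchy accumulator loop (objective: simpler).
-- Both Pythons mutate their list arguments the same way (append to monkey6/monkey2, clear monkey0);
-- the equivalence proved here is about the returned 4-tuple.

-- ===== PORT A =====
-- while (list[-1] == "0") and (list[-2] == "0") and (list[-3] == "0"): list.pop()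
-- (pyGetD with default 'x': on the inputs A reaches, the indices are always in range)
def pvPopZerosA (l : List Char) : List Char :=
  if h : ((PySem.List.pyGetD l (-1) 'x' == '0') && (PySem.List.pyGetD l (-2) 'x' == '0')
          && (PySem.List.pyGetD l (-3) 'x' == '0')) = true then
    pvPopZerosA l.dropLast
  else l
termination_by l.length
decreasing_by
  cases l with
  | nil => simp [PySem.List.pyGetD, PySem.List.pyGet?] at h
  | cons a as => simp [List.length_dropLast]

-- the body of A's for-loop computing the transformed worry value
def pvTransformA (item : Int) : Int :=
  let value : Int := 13 * item
  if value > 10000 then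
    let s : List Char := PySem.Int.toChars value        -- value = str(value)
    let l : List Char := s.foldl (fun acc ch => acc ++ [ch]) []   -- list = []; for letter in value: list.append(letter)
    let l : List Char := pvPopZerosA l
    -- new_value = f"{list[-4]}{list[-3]}{list[-2]}{list[-1]}"; value = int(new_value)
    let newValue : List Char := [PySem.List.pyGetD l (-4) 'x', PySem.List.pyGetD l (-3) 'x',
                                 PySem.List.pyGetD l (-2) 'x', PySem.List.pyGetD l (-1) 'x']
    (PySem.Int.ofChars? newValue).getD 0
  else value

def monkey2_throw (monkey0_count : Int) (monkey0_list : List Int) (monkey6_list : List Int) (monkey2_list : List Int) : Int × List Int × List Int × List Int :=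
  let st := monkey0_list.foldl (fun (st : Int × List Int × List Int) item =>
    let value := pvTransformA item
    if PySem.Int.mod value 7 == 0 then (st.1 + 1, st.2.1 ++ [value], st.2.2)
    else (st.1 + 1, st.2.1, st.2.2 ++ [value])) (monkey0_count, monkey6_list, monkey2_list)
  (st.1, ([] : List Int), st.2.1, st.2.2)

-- ===== PORT B =====
-- while value % 1000 == 0: value //= 10   (the 0 < v conjunct only makes the recursion total;
-- every reachable call has 0 < v)
def pvStripB (v : Int) : Int :=
  if h : 0 < v ∧ PySem.Int.mod v 1000 = 0 then pvStripB (PySem.Int.floordiv v 10) else v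
termination_by v.toNat
decreasing_by
  rw [PySem.Int.floordiv_eq_ediv_of_pos (by norm_num)]
  omega

def pvTransformB (item : Int) : Int :=
  let value : Int := 13 * item
  if value > 10000 then PySem.Int.mod (pvStripB value) 10000 else value

def monkey2_throw_alt (monkey0_count : Int) (monkey0_list : List Int) (monkey6_list : List Int) (monkey2_list : List Int) : Int × List Int × List Int × List Int :=
  let vals := monkey0_list.map pvTransformB
  (monkey0_count + PySem.List.len vals, ([] : List Int),
   monkey6_list ++ vals.filter (fun v => PySem.Int.mod v 7 == 0),
   monkey2_list ++ vals.filter (fun v => !(PySem.Int.mod v 7 == 0)))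

-- ===== PRECONDITION & SPEC =====
def Spec_monkey2_throw (monkey0_count : Int) (monkey0_list : List Int) (monkey6_list : List Int) (monkey2_list : List Int) (out : Int × List Int × List Int × List Int) : Prop := out = monkey2_throw_alt monkey0_count monkey0_list monkey6_list monkey2_list
instance (monkey0_count : Int) (monkey0_list : List Int) (monkey6_list : List Int) (monkey2_list : List Int) (out : Int × List Int × List Int × List Int) : Decidable (Spec_monkey2_throw monkey0_count monkey0_list monkey6_list monkey2_list out) := by unfold Spec_monkey2_throw; infer_instance

-- ===== CLAIM (what is proved, stated in full; the proofs are below) =====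
def Claim_equal_monkey2_throw : Prop := ∀ (monkey0_count : Int) (monkey0_list : List Int) (monkey6_list : List Int) (monkey2_list : List Int), Dom_monkey2_throw monkey0_count monkey0_list monkey6_list monkey2_list → Spec_monkey2_throw monkey0_count monkey0_list monkey6_list monkey2_list (monkey2_throw monkey0_count monkey0_list monkey6_list monkey2_list)

-- ===== LEMMAS AND PROOFS =====

-- Nat mirror of B's strip loop
def pvStripN (m : Nat) : Nat :=
  if h : 0 < m ∧ m % 1000 = 0 then pvStripN (m / 10) else m
termination_by m
decreasing_by omega

lemma pvStripB_eq : ∀ (m : Nat), pvStripB (m : Int) = ((pvStripN m : Nat) : Int) := by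
  intro m
  induction m using Nat.strong_induction_on with
  | _ m ih =>
    rw [pvStripB, pvStripN]
    by_cases h : 0 < m ∧ m % 1000 = 0
    · have h10 : PySem.Int.mod (m : Int) 1000 = 0 := by
        rw [PySem.Int.mod_eq_emod_of_pos (by norm_num)]; omega
      rw [dif_pos ⟨by exact_mod_cast h.1, h10⟩, dif_pos h]
      have hfd : PySem.Int.floordiv (m : Int) 10 = ((m / 10 : Nat) : Int) := by
        rw [PySem.Int.floordiv_eq_ediv_of_pos (by norm_num)]; omega
      rw [hfd]
      exact ih (m / 10) (Nat.div_lt_self h.1 (by norm_num))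
    · have h' : ¬ (0 < (m : Int) ∧ PySem.Int.mod (m : Int) 1000 = 0) := by
        rw [PySem.Int.mod_eq_emod_of_pos (by norm_num)]
        rintro ⟨h1, h2⟩; exact h ⟨by exact_mod_cast h1, by omega⟩
      rw [dif_neg h', dif_neg h]

-- str(n) for positive n is the reversed digit list
lemma pvToDigitsCore_eq : ∀ (f n : Nat), 0 < n → n < 10 ^ f → ∀ l,
    Nat.toDigitsCore 10 f n l = ((Nat.digits 10 n).map Nat.digitChar).reverse ++ l := by
  intro f
  induction f with
  | zero => intro n hn hlt; omega
  | succ f ih =>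
    intro n hn hlt l
    rw [Nat.toDigitsCore]
    have hd : Nat.digits 10 n = n % 10 :: Nat.digits 10 (n / 10) := Nat.digits_def' (by norm_num) hn
    by_cases h0 : n / 10 = 0
    · have hn10 : n < 10 := by omega
      simp [h0, hd, Nat.mod_eq_of_lt hn10]
    · have h1 : 0 < n / 10 := Nat.pos_of_ne_zero h0
      have h2 : n / 10 < 10 ^ f := by
        have : n < 10 ^ f * 10 := by
          calc n < 10 ^ (f + 1) := hlt
          _ = 10 ^ f * 10 := by ring
        omega
      simp only [h0, if_false]
      rw [ih (n / 10) h1 h2]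
      simp [hd, List.append_assoc]

lemma pvToChars_pos (v : Int) (h : 0 < v) :
    PySem.Int.toChars v = ((Nat.digits 10 v.toNat).map Nat.digitChar).reverse := by
  unfold PySem.Int.toChars
  rw [if_neg (by omega)]
  unfold Nat.toDigits
  rw [pvToDigitsCore_eq (v.toNat + 1) v.toNat (by omega)
    (lt_of_lt_of_le (Nat.lt_pow_self (by norm_num)) (Nat.pow_le_pow_right (by norm_num) (Nat.le_succ _)))]
  simp

lemma pvDigitsGetD : ∀ (i m : Nat), (Nat.digits 10 m).getD i 0 = m / 10 ^ i % 10 := by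
  intro i
  induction i with
  | zero =>
    intro m
    rcases Nat.eq_zero_or_pos m with h | h
    · simp [h]
    · rw [Nat.digits_def' (by norm_num) h]; simp
  | succ i ih =>
    intro m
    rcases Nat.eq_zero_or_pos m with h | h
    · simp [h]
    · rw [Nat.digits_def' (by norm_num) h]
      simp only [List.getD_cons_succ, ih]
      rw [Nat.div_div_eq_div_mul, pow_succ]
      ring_nf

lemma pvGetRev (D : List Nat) (i : Int) (k : Nat) (hik : i = -(k : Int)) (h0 : 0 < k)
    (hk : k ≤ D.length) :
    PySem.List.pyGetD ((D.map Nat.digitChar).reverse) i 'x'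
      = Nat.digitChar (D.getD (k - 1) 0) := by
  subst hik
  rw [PySem.List.pyGetD_neg_natCast _ k 'x' h0 (by simpa using hk)]
  rw [List.getElem_reverse]
  simp only [List.length_reverse, List.length_map]
  rw [List.getElem_map]
  rw [List.getD_eq_getElem D 0 (show k - 1 < D.length by omega)]
  exact congrArg Nat.digitChar (getElem_congr rfl (by omega) (by omega))

lemma pvDigitCharZero (d : Nat) (h : d < 10) : (Nat.digitChar d == '0') = true ↔ d = 0 := by
  interval_cases d <;> decide

-- the while-condition of A's pop loop, numerically
lemma pvCondIff (m : Nat) (hm : 0 < m) :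
    ((PySem.List.pyGetD (((Nat.digits 10 m).map Nat.digitChar).reverse) (-1) 'x' == '0')
      && (PySem.List.pyGetD (((Nat.digits 10 m).map Nat.digitChar).reverse) (-2) 'x' == '0')
      && (PySem.List.pyGetD (((Nat.digits 10 m).map Nat.digitChar).reverse) (-3) 'x' == '0')) = true
    ↔ m % 1000 = 0 := by
  have hm' : m ≠ 0 := by omega
  by_cases hlt : m < 1000
  · have hmod : ¬ m % 1000 = 0 := by omega
    have hle3 : (Nat.digits 10 m).length ≤ 3 := (Nat.digits_length_le_iff (by norm_num) m).mpr (by omega)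
    simp only [hmod, iff_false]
    intro hcond
    rw [Bool.and_eq_true, Bool.and_eq_true] at hcond
    by_cases h3 : (Nat.digits 10 m).length < 3
    · have hnone : PySem.List.pyGet? (((Nat.digits 10 m).map Nat.digitChar).reverse) (-3) = none := by
        rw [PySem.List.pyGet?_eq_none_iff]
        unfold PySem.Raise.InRange
        simp only [List.length_reverse, List.length_map]
        omega
      rw [PySem.List.pyGetD_of_none _ _ _ hnone] at hcond
      simp at hcond
    · have h3' : (Nat.digits 10 m).length = 3 := by omega
      rw [pvGetRev (Nat.digits 10 m) (-3) 3 (by norm_num) (by norm_num) (by omega)] at hcond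
      have h100 : 100 ≤ m := (Nat.lt_digits_length_iff (b := 10) (k := 2) (by norm_num) m).mp (by omega)
      have hlast : (Nat.digits 10 m).getD 2 0 ≠ 0 := by
        rw [pvDigitsGetD]; norm_num; omega
      have hd : (Nat.digits 10 m).getD 2 0 < 10 := by rw [pvDigitsGetD]; omega
      exact hlast ((pvDigitCharZero _ hd).mp hcond.2)
  · have h4 : 4 ≤ (Nat.digits 10 m).length := by
      by_contra h
      have hx := (Nat.digits_length_le_iff (b := 10) (k := 3) (by norm_num) m).mp (by omega)
      norm_num at hx
      omega
    rw [pvGetRev (Nat.digits 10 m) (-1) 1 (by norm_num) (by norm_num) (by omega),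
        pvGetRev (Nat.digits 10 m) (-2) 2 (by norm_num) (by norm_num) (by omega),
        pvGetRev (Nat.digits 10 m) (-3) 3 (by norm_num) (by norm_num) (by omega)]
    rw [Bool.and_eq_true, Bool.and_eq_true]
    rw [pvDigitCharZero _ (by rw [pvDigitsGetD]; omega),
        pvDigitCharZero _ (by rw [pvDigitsGetD]; omega),
        pvDigitCharZero _ (by rw [pvDigitsGetD]; omega)]
    rw [pvDigitsGetD, pvDigitsGetD, pvDigitsGetD]
    norm_num
    omega

lemma pvPopZerosA_eq : ∀ (m : Nat), 0 < m →
    pvPopZerosA (((Nat.digits 10 m).map Nat.digitChar).reverse)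
      = ((Nat.digits 10 (pvStripN m)).map Nat.digitChar).reverse := by
  intro m
  induction m using Nat.strong_induction_on with
  | _ m ih =>
    intro hm
    rw [pvPopZerosA, pvStripN]
    by_cases h : m % 1000 = 0
    · have hge : 1000 ≤ m := by omega
      rw [dif_pos ((pvCondIff m hm).mpr h), dif_pos ⟨hm, h⟩]
      have hd : Nat.digits 10 m = m % 10 :: Nat.digits 10 (m / 10) := Nat.digits_def' (by norm_num) hm
      have hdrop : (((Nat.digits 10 m).map Nat.digitChar).reverse).dropLast
          = ((Nat.digits 10 (m / 10)).map Nat.digitChar).reverse := by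
        rw [hd]; simp
      rw [hdrop]
      exact ih (m / 10) (Nat.div_lt_self hm (by norm_num)) (by omega)
    · rw [dif_neg (fun hc => h ((pvCondIff m hm).mp hc)), dif_neg (fun hc => h hc.2)]

lemma pvStripN_props : ∀ (m : Nat), 0 < m → 13 ∣ m → (10000 < m ∨ 100 ∣ m) →
    1000 ≤ pvStripN m ∧ ¬ (1000 ∣ pvStripN m) := by
  intro m
  induction m using Nat.strong_induction_on with
  | _ m ih =>
    intro hm h13 hinv
    rw [pvStripN]
    by_cases h : 0 < m ∧ m % 1000 = 0
    · rw [dif_pos h]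
      have h10 : m / 10 * 10 = m := by omega
      have h13' : 13 ∣ m / 10 :=
        (Nat.Coprime.dvd_of_dvd_mul_right (by decide : Nat.Coprime 13 10))
          (show 13 ∣ m / 10 * 10 by rw [h10]; exact h13)
      refine ih (m / 10) (Nat.div_lt_self hm (by norm_num)) (by omega) h13' (Or.inr (by omega))
    · rw [dif_neg h]
      have hmod : ¬ m % 1000 = 0 := fun hc => h ⟨hm, hc⟩
      refine ⟨?_, by omega⟩
      rcases hinv with hbig | h100
      · omega
      · have : 1300 ∣ m := Nat.Coprime.mul_dvd_of_dvd_of_dvd (by decide : Nat.Coprime 13 100) h13 h100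
        exact le_trans (by norm_num) (Nat.le_of_dvd hm this)

lemma pvOfCharsFour : ∀ (a b c d : Fin 10),
    PySem.Int.ofChars? [Nat.digitChar a, Nat.digitChar b, Nat.digitChar c, Nat.digitChar d]
      = some ((a : Nat) * 1000 + (b : Nat) * 100 + (c : Nat) * 10 + (d : Nat)) := by
  decide

lemma pvOfCharsFour' (a b c d : Nat) (ha : a < 10) (hb : b < 10) (hc : c < 10) (hd : d < 10) :
    PySem.Int.ofChars? [Nat.digitChar a, Nat.digitChar b, Nat.digitChar c, Nat.digitChar d]
      = some ((a : Int) * 1000 + (b : Int) * 100 + (c : Int) * 10 + (d : Int)) :=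
  pvOfCharsFour ⟨a, ha⟩ ⟨b, hb⟩ ⟨c, hc⟩ ⟨d, hd⟩

lemma pvTransform_eq (item : Int) : pvTransformA item = pvTransformB item := by
  unfold pvTransformA pvTransformB
  by_cases hv : 13 * item > 10000
  · simp only [hv, if_true]
    set v : Int := 13 * item with hvdef
    have hv0 : 0 < v := by omega
    have hcast : ((v.toNat : Int)) = v := Int.toNat_of_nonneg (by omega)
    set n : Nat := v.toNat with hdefn
    have hn : 10000 < n := by omega
    have h13 : 13 ∣ n := by
      have hdv : (13 : Int) ∣ v := ⟨item, rfl⟩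
      rw [← hcast] at hdv
      exact_mod_cast hdv
    rw [pvToChars_pos v hv0, PySem.List.foldl_append_singleton, List.nil_append]
    rw [pvPopZerosA_eq n (by omega)]
    obtain ⟨hge, -⟩ := pvStripN_props n (by omega) h13 (Or.inl hn)
    set m' : Nat := pvStripN n with hm'def
    have hlen : 4 ≤ (Nat.digits 10 m').length := by
      by_contra hcon
      have hx := (Nat.digits_length_le_iff (b := 10) (k := 3) (by norm_num) m').mp (by omega)
      norm_num at hx
      omega
    rw [pvGetRev (Nat.digits 10 m') (-4) 4 (by norm_num) (by norm_num) (by omega),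
        pvGetRev (Nat.digits 10 m') (-3) 3 (by norm_num) (by norm_num) (by omega),
        pvGetRev (Nat.digits 10 m') (-2) 2 (by norm_num) (by norm_num) (by omega),
        pvGetRev (Nat.digits 10 m') (-1) 1 (by norm_num) (by norm_num) (by omega)]
    rw [pvDigitsGetD, pvDigitsGetD, pvDigitsGetD, pvDigitsGetD]
    rw [pvOfCharsFour' _ _ _ _ (Nat.mod_lt _ (by norm_num)) (Nat.mod_lt _ (by norm_num))
      (Nat.mod_lt _ (by norm_num)) (Nat.mod_lt _ (by norm_num))]
    simp only [Option.getD_some]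
    rw [← hcast, pvStripB_eq, ← hm'def]
    rw [PySem.Int.mod_eq_emod_of_pos (by norm_num)]
    norm_num
    omega
  · simp only [hv, if_false]

lemma pvLoop_eq (l : List Int) : ∀ (c : Int) (m6 m2 : List Int),
    l.foldl (fun (st : Int × List Int × List Int) item =>
      let value := pvTransformB item
      if PySem.Int.mod value 7 == 0 then (st.1 + 1, st.2.1 ++ [value], st.2.2)
      else (st.1 + 1, st.2.1, st.2.2 ++ [value])) (c, m6, m2)
    = (c + l.length,
       m6 ++ (l.map pvTransformB).filter (fun v => PySem.Int.mod v 7 == 0),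
       m2 ++ (l.map pvTransformB).filter (fun v => !(PySem.Int.mod v 7 == 0))) := by
  induction l with
  | nil => simp
  | cons x xs ih =>
    intro c m6 m2
    simp only [List.foldl_cons, List.map_cons, List.filter_cons]
    cases h : (PySem.Int.mod (pvTransformB x) 7 == 0) <;>
      simp only [h, Bool.false_eq_true, Bool.not_false, Bool.not_true, if_true, if_false, ih] <;>
      exact Prod.ext (by push_cast [List.length_cons]; ring) (Prod.ext (by simp [List.append_assoc]) (by simp [List.append_assoc]))

-- ===== VERDICT (by name: the statement is the Claim_ definition above) =====
theorem monkey2_throw_spec : Claim_equal_monkey2_throw := by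
  intro c m0 m6 m2 _
  unfold Spec_monkey2_throw monkey2_throw monkey2_throw_alt
  have hf : (fun (st : Int × List Int × List Int) item =>
      let value := pvTransformA item
      if PySem.Int.mod value 7 == 0 then (st.1 + 1, st.2.1 ++ [value], st.2.2)
      else (st.1 + 1, st.2.1, st.2.2 ++ [value]))
    = (fun (st : Int × List Int × List Int) item =>
      let value := pvTransformB item
      if PySem.Int.mod value 7 == 0 then (st.1 + 1, st.2.1 ++ [value], st.2.2)
      else (st.1 + 1, st.2.1, st.2.2 ++ [value])) := by
    funext st item; rw [pvTransform_eq]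
  rw [hf, pvLoop_eq]
  simp [PySem.List.len_eq]
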